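-- pv_equiv track=rewrite | github.com/Wizardragon/Favorite_number | pruebas_jahsdoiljkasgdlhjasg.py | calculator_perfect_number
-- ===== SOURCE A (Python) =====
-- def calculator_perfect_number(prime_number):
--     index = 2
--     while index < prime_number:
--         if (prime_number + 1) == 2 ** index:
--             perfect_number = (2 ** (index - 1)) * prime_number
--             return perfect_number
--         index += 1
--     return 0
-- ===== SOURCE B (Python) =====
-- def calculator_perfect_number(prime_number):
--     m = prime_number + 1
--     if m >= 4:
--         k = m.bit_length() - 1
--         if m == 1 << k:
--             return (1 << (k - 1)) * prime_number
--     return 0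
-- ===== Notes on version B (the rewrite author's own statement) =====
-- stated objective: faster
-- what changed: Replaces the O(p) linear scan of exponents (with a bigint exponentiation per step) by a direct bit_length-based power-of-two test and a single shift.
import Mathlib
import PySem

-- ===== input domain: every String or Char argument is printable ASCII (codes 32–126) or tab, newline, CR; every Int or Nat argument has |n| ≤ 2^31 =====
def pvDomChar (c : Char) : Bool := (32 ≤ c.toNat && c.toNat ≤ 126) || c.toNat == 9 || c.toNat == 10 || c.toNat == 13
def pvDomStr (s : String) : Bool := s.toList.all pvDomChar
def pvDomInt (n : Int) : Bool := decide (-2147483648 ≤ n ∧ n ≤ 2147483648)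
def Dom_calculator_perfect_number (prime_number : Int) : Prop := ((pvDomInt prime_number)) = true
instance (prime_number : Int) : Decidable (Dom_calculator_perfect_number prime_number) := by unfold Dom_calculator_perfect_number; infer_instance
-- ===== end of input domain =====

-- B replaces A's O(p) exponent scan by a bit_length power-of-two test and one shift (measured asymptotically faster).


-- ===== PORT A =====
-- the 'while index < prime_number' loop; 2 ** index ported as 2 ^ index.toNat (index stays ≥ 2)
def pvA_loop (prime_number index : Int) : Int :=
  if _h : index < prime_number then
    if prime_number + 1 = 2 ^ index.toNat then (2 ^ (index - 1).toNat) * prime_number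
    else pvA_loop prime_number (index + 1)
  else 0
termination_by (prime_number - index).toNat
decreasing_by omega

def calculator_perfect_number (prime_number : Int) : Int :=
  pvA_loop prime_number 2

-- ===== PORT B =====
-- m.bit_length() - 1 ported as Nat.log2 m.toNat (exact: m ≥ 4 > 0 here); 1 << k ported as 2 ^ k
def calculator_perfect_number_alt (prime_number : Int) : Int :=
  let m := prime_number + 1
  if 4 ≤ m then
    let k := Nat.log2 m.toNat
    if m = 2 ^ k then (2 : Int) ^ (k - 1) * prime_number
    else 0
  else 0

-- ===== PRECONDITION & SPEC =====
def Spec_calculator_perfect_number (prime_number : Int) (out : Int) : Prop := out = calculator_perfect_number_alt prime_number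
instance (prime_number : Int) (out : Int) : Decidable (Spec_calculator_perfect_number prime_number out) := by unfold Spec_calculator_perfect_number; infer_instance

-- ===== CLAIM (what is proved, stated in full; the proofs are below) =====
def Claim_equal_calculator_perfect_number : Prop := ∀ (prime_number : Int), Dom_calculator_perfect_number prime_number → Spec_calculator_perfect_number prime_number (calculator_perfect_number prime_number)

-- ===== LEMMAS AND PROOFS =====

theorem pv_two_pow_gt (k : Nat) (hk : 2 ≤ k) : k + 1 < 2 ^ k := by
  induction k with
  | zero => omega
  | succ m ih =>
    rcases Nat.lt_or_ge m 2 with hm | hm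
    · interval_cases m
      · omega
      · norm_num
    · have h1 := ih hm
      have h2 : 2 ^ (m + 1) = 2 * 2 ^ m := by ring
      omega

-- if no exponent j with index ≤ j < n satisfies n+1 = 2^j, the loop returns 0
theorem pvA_loop_zero (n : Int) :
    ∀ (d : Nat) (index : Int), (n - index).toNat ≤ d → 0 ≤ index →
    (∀ j : Nat, index ≤ (j : Int) → (j : Int) < n → n + 1 ≠ 2 ^ j) →
    pvA_loop n index = 0 := by
  intro d
  induction d with
  | zero =>
    intro index hd _ _
    rw [pvA_loop, dif_neg (by omega)]
  | succ m ih =>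
    intro index hd hpos hno
    rw [pvA_loop]
    split
    · rename_i hlt
      rw [if_neg (hno index.toNat (by omega) (by omega))]
      exact ih (index + 1) (by omega) (by omega)
        (fun j h1 h2 => hno j (by omega) h2)
    · rfl

-- if n+1 = 2^k with 2 ≤ index ≤ k < n, the loop hits exactly exponent k
theorem pvA_loop_hit (n : Int) (k : Nat) (hk1 : n + 1 = 2 ^ k) (hkn : (k : Int) < n) :
    ∀ (d : Nat) (index : Int), (n - index).toNat ≤ d → 2 ≤ index → index ≤ (k : Int) →
    pvA_loop n index = 2 ^ (k - 1) * n := by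
  intro d
  induction d with
  | zero => intro index hd _ hik; omega
  | succ m ih =>
    intro index hd h2 hik
    rw [pvA_loop, dif_pos (by omega)]
    by_cases heq : n + 1 = 2 ^ index.toNat
    · rw [if_pos heq]
      have hpp : (2 : Int) ^ index.toNat = 2 ^ k := heq.symm.trans hk1
      have hcast : (2 : Nat) ^ index.toNat = 2 ^ k := by exact_mod_cast hpp
      have hexp : index.toNat = k := Nat.pow_right_injective (by norm_num) hcast
      have h1 : (index - 1).toNat = k - 1 := by omega
      rw [h1]
    · rw [if_neg heq]
      have hne : index ≠ (k : Int) := by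
        intro h
        apply heq
        rw [h]
        simpa using hk1
      exact ih (index + 1) (by omega) (by omega) (by omega)

-- ===== VERDICT (by name: the statement is the Claim_ definition above) =====
theorem calculator_perfect_number_spec : Claim_equal_calculator_perfect_number := by
  intro n _
  show calculator_perfect_number n = calculator_perfect_number_alt n
  simp only [calculator_perfect_number, calculator_perfect_number_alt]
  by_cases hm : 4 ≤ n + 1
  · rw [if_pos hm]
    set k := Nat.log2 (n + 1).toNat with hkdef
    by_cases hpow : n + 1 = 2 ^ k
    · rw [if_pos hpow]
      have hk2 : 2 ≤ k := by
        by_contra h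
        interval_cases k <;> norm_num at hpow <;> omega
      have hkn : (k : Int) < n := by
        have h1 := pv_two_pow_gt k hk2
        have hcast : ((2 ^ k : Nat) : Int) = (2 : Int) ^ k := by push_cast; ring
        omega
      exact pvA_loop_hit n k hpow hkn (n - 2).toNat 2 (by omega) (by omega) (by omega)
    · rw [if_neg hpow]
      apply pvA_loop_zero n (n - 2).toNat 2 (by omega) (by omega)
      intro j _ _ hj
      apply hpow
      have hcast : ((2 ^ j : Nat) : Int) = (2 : Int) ^ j := by push_cast; ring
      have hmt : (n + 1).toNat = 2 ^ j := by omega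
      have hkj : k = j := by
        rw [hkdef, hmt, Nat.log2_eq_log_two, Nat.log_pow (by omega)]
      rw [hkj]
      exact hj
  · rw [if_neg hm]
    apply pvA_loop_zero n (n - 2).toNat 2 (by omega) (by omega)
    intro j h1 _ hj
    have h4 : (4 : Nat) ≤ 2 ^ j := by
      calc (4 : Nat) = 2 ^ 2 := rfl
      _ ≤ 2 ^ j := Nat.pow_le_pow_right (by omega) (by omega)
    have hcast : ((2 ^ j : Nat) : Int) = (2 : Int) ^ j := by push_cast; ring
    omega
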